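-- pv_equiv track=rewrite | github.com/gandastik/LeetCode-Problems | 1662.py | arrayStringAreEqual
-- ===== SOURCE A (Python) =====
-- from typing import List
--
-- def arrayStringAreEqual(word1: List[str], word2: List[int]) -> bool:
--     str1 = ''
--     str2 = ''
--     for i in word1:
--         str1 += i
--     for j in word2:
--         str2 += j
--     if(str1 == str2): return True
--     return False
-- ===== SOURCE B (Python) =====
-- def arrayStringAreEqual(word1, word2):
--     # Lazy two-pointer walk over both concatenations; no strings are built.
--     i1 = j1 = i2 = j2 = 0
--     while True:
--         while i1 < len(word1) and j1 == len(word1[i1]):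
--             i1 += 1
--             j1 = 0
--         while i2 < len(word2) and j2 == len(word2[i2]):
--             i2 += 1
--             j2 = 0
--         if i1 == len(word1) or i2 == len(word2):
--             return i1 == len(word1) and i2 == len(word2)
--         if word1[i1][j1] != word2[i2][j2]:
--             return False
--         j1 += 1
--         j2 += 1
-- ===== Notes on version B (the rewrite author's own statement) =====
-- stated objective: alternative
-- what changed: B never builds the concatenated strings: it walks both lists with a two-pointer (word index, char index) cursor, comparing characters pairwise with early exit on the first mismatch or when one side runs out.
import Mathlib
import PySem

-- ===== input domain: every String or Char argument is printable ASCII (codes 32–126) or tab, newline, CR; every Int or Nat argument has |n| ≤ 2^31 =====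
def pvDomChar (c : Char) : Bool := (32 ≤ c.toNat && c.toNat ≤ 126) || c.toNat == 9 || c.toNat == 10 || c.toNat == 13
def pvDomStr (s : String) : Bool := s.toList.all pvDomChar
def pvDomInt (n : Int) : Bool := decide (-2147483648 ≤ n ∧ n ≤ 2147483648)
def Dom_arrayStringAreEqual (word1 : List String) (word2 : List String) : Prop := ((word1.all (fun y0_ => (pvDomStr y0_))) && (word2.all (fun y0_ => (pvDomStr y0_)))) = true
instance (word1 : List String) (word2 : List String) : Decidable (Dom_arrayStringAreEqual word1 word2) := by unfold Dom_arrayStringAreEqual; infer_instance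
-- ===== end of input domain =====

-- B replaces A's build-two-strings-and-compare with a lazy two-pointer character walk (no concatenation, early exit); return value only, no side effects in either.

-- ===== PORT A =====
def arrayStringAreEqual (word1 : List String) (word2 : List String) : Bool :=
  let str1 := word1.foldl (fun s i => s ++ i) ""
  let str2 := word2.foldl (fun s j => s ++ j) ""
  if str1 == str2 then true else false

-- ===== PORT B =====
-- the two-pointer cursor of Source B: skip exhausted words, compare one char, advance both
def pvWalk : List (List Char) → List (List Char) → Bool
  | [] :: xs, ys => pvWalk xs ys
  | xs, [] :: ys => pvWalk xs ys
  | [], [] => true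
  | [], _ :: _ => false
  | _ :: _, [] => false
  | (a :: as) :: xs, (b :: bs) :: ys => a == b && pvWalk (as :: xs) (bs :: ys)
termination_by xs ys => xs.flatten.length + ys.flatten.length + xs.length + ys.length
decreasing_by all_goals (simp_all; try omega)

def arrayStringAreEqual_alt (word1 : List String) (word2 : List String) : Bool :=
  pvWalk (word1.map String.toList) (word2.map String.toList)

-- ===== PRECONDITION & SPEC =====
def Spec_arrayStringAreEqual (word1 : List String) (word2 : List String) (out : Bool) : Prop := out = arrayStringAreEqual_alt word1 word2
instance (word1 : List String) (word2 : List String) (out : Bool) : Decidable (Spec_arrayStringAreEqual word1 word2 out) := by unfold Spec_arrayStringAreEqual; infer_instance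

-- ===== CLAIM (what is proved, stated in full; the proofs are below) =====
def Claim_equal_arrayStringAreEqual : Prop := ∀ (word1 : List String) (word2 : List String), Dom_arrayStringAreEqual word1 word2 → Spec_arrayStringAreEqual word1 word2 (arrayStringAreEqual word1 word2)

-- ===== LEMMAS AND PROOFS =====

theorem pvWalk_eq_flatten : ∀ xs ys : List (List Char), pvWalk xs ys = (xs.flatten == ys.flatten) := by
  intro xs ys
  fun_induction pvWalk xs ys with
  | case1 xs ys ih => simpa using ih
  | case2 xs ys _ ih => simp_all
  | case3 => simp
  | case4 h t hne => simp; exact fun hh => absurd hh hne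
  | case5 h t hne => simp; exact fun hh => absurd hh hne
  | case6 a as xs b bs ys ih =>
      simp [ih, List.cons_append]

theorem foldl_append_toList : ∀ (ws : List String) (s : String),
    (ws.foldl (fun a i => a ++ i) s).toList = s.toList ++ (ws.map String.toList).flatten := by
  intro ws
  induction ws with
  | nil => simp
  | cons w ws ih => intro s; simp [List.foldl_cons, ih, List.append_assoc]

-- ===== VERDICT (by name: the statement is the Claim_ definition above) =====
theorem arrayStringAreEqual_spec : Claim_equal_arrayStringAreEqual := by
  intro word1 word2 _
  unfold Spec_arrayStringAreEqual arrayStringAreEqual arrayStringAreEqual_alt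
  rw [pvWalk_eq_flatten]
  have h1 := foldl_append_toList word1 ""
  have h2 := foldl_append_toList word2 ""
  simp only [String.toList_empty, List.nil_append] at h1 h2
  have key : (word1.foldl (fun s i => s ++ i) "" = word2.foldl (fun s j => s ++ j) "") ↔
      ((word1.map String.toList).flatten = (word2.map String.toList).flatten) := by
    constructor
    · intro hc; rw [← h1, ← h2, hc]
    · intro hc; apply String.ext; simpa [h1, h2] using hc
  by_cases h : (word1.map String.toList).flatten = (word2.map String.toList).flatten
  · simp [key, h]
  · simp [key, h]
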